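-- pv_equiv track=rewrite | github.com/jennyzzt/LLM_debate_on_ARC | ARC_gen_agents2_rounds1_openai/6e82a1ae/agent1/algo0.py | solve
-- ===== SOURCE A (Python) =====
-- def solve(input_grid):
--     # Initialize the output grid with the same dimensions as the input grid, filled with zeros.
--     output_grid = [[0 for _ in range(len(input_grid[0]))] for _ in range(len(input_grid))]
--
--     # Initialize a counter to keep track of the occurrences of '5'.
--     counter = 1
--
--     # Iterate through each cell in the input grid.
--     for i in range(len(input_grid)):
--         for j in range(len(input_grid[0])):
--             # If the current cell value is '5', replace it with the current counter value in the output grid.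
--             if input_grid[i][j] == 5:
--                 output_grid[i][j] = counter
--                 # Increment the counter for the next occurrence of '5'.
--                 counter += 1
--             # If the current cell value is not '5', it remains '0' as initialized in the output grid.
--
--     # Return the transformed output grid.
--     return output_grid
-- ===== SOURCE B (Python) =====
-- def solve(input_grid):
--     # Flatten the grid row-major, reading each row at the width of row 0.
--     flat = [row[j] for row in input_grid for j in range(len(input_grid[0]))]
--     # One 1-D pass: running prefix count of 5s gives each 5-cell its number.
--     labels = []
--     count = 0
--     for v in flat:
--         if v == 5:
--             count += 1
--             labels.append(count)
--         else:
--             labels.append(0)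
--     # Reshape the flat label list back into rows of the original width.
--     return [labels[i * len(input_grid[0]):(i + 1) * len(input_grid[0])]
--             for i in range(len(input_grid))]
-- ===== Notes on version B (the rewrite author's own statement) =====
-- stated objective: alternative
-- what changed: Replaces A's 2-D loop that assigns a mutable counter into a preallocated grid with a flatten/prefix-scan/reshape pipeline: flatten the grid row-major, number the 5s in a single 1-D running-count pass over the flat list, then slice the flat label list back into rows.
import Mathlib
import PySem

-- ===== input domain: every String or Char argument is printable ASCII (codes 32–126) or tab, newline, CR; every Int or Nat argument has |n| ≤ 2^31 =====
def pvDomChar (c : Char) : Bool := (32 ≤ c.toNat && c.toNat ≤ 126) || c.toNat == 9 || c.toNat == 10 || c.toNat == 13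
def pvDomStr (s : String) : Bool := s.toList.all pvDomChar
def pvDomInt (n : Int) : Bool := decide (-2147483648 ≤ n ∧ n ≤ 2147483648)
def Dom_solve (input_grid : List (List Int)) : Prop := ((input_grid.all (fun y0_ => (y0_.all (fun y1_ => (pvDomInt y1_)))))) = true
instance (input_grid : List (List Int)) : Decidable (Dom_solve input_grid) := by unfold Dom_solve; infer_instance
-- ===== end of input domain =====

-- B replaces A's 2-D assign-into-preallocated-grid loop by a flatten / 1-D prefix-count
-- pass / reshape-by-slicing pipeline; alternative decomposition, same cost.

-- ===== PORT A =====
-- the body of A's inner loop: threads (output_grid, counter); i, j come from range(...)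
-- so they are ≥ 0 and .toNat is exact for output_grid[i][j] = counter
def stepA (input_grid : List (List Int)) (i : Int) (st : List (List Int) × Int) (j : Int) :
    List (List Int) × Int :=
  if PySem.List.pyGetD (PySem.List.pyGetD input_grid i []) j 0 == 5 then
    (st.1.set i.toNat ((PySem.List.pyGetD st.1 i []).set j.toNat st.2), st.2 + 1)
  else st

def solve (input_grid : List (List Int)) : List (List Int) :=
  -- len(input_grid[0]) raises IndexError only on ragged grids' inner reads; the empty grid
  -- never evaluates it in A. The port defaults the missing row to [] (exact inside Pre_solve)
  let w : Int := (((PySem.List.pyGet? input_grid 0).getD []).length : Int)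
  -- output_grid = [[0 for _ in range(len(input_grid[0]))] for _ in range(len(input_grid))]
  let output0 : List (List Int) :=
    (PySem.List.pyRange 0 (input_grid.length : Int) 1).map
      (fun _ => (PySem.List.pyRange 0 w 1).map (fun _ => (0 : Int)))
  -- for i in range(len(input_grid)): for j in range(len(input_grid[0])): ...
  let final :=
    (PySem.List.pyRange 0 (input_grid.length : Int) 1).foldl
      (fun st i => (PySem.List.pyRange 0 w 1).foldl (stepA input_grid i) st)
      (output0, (1 : Int))
  final.1

-- ===== PORT B =====
-- the body of B's 1-D pass: threads (labels, count)
def stepB (st : List Int × Int) (v : Int) : List Int × Int :=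
  if v == 5 then (st.1 ++ [st.2 + 1], st.2 + 1) else (st.1 ++ [(0 : Int)], st.2)

def solve_alt (input_grid : List (List Int)) : List (List Int) :=
  let w : Int := (((PySem.List.pyGet? input_grid 0).getD []).length : Int)
  -- flat = [row[j] for row in input_grid for j in range(len(input_grid[0]))]
  -- row[j] raises only on ragged grids (excluded by Pre_solve); the port defaults to 0
  let flat : List Int :=
    input_grid.flatMap (fun row =>
      (PySem.List.pyRange 0 w 1).map (fun j => PySem.List.pyGetD row j 0))
  -- labels/count loop
  let labels : List Int := (flat.foldl stepB (([] : List Int), (0 : Int))).1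
  -- return [labels[i*w:(i+1)*w] for i in range(len(input_grid))]
  (PySem.List.pyRange 0 (input_grid.length : Int) 1).map
    (fun i => PySem.List.slice labels (some (i * w)) (some ((i + 1) * w)))

-- ===== PRECONDITION & SPEC =====
-- Pre_ excludes exactly the ragged grids with some row shorter than row 0, on which A
-- raises IndexError at input_grid[i][j]; the empty grid is inside Pre_ (A returns []).
def Pre_solve (input_grid : List (List Int)) : Prop :=
  ∀ row ∈ input_grid, (input_grid.headD []).length ≤ row.length
instance (input_grid : List (List Int)) : Decidable (Pre_solve input_grid) := by
  unfold Pre_solve; infer_instance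

def pvWitness_solve : List (List Int) := [[5, 0], [0, 5]]

def Spec_solve (input_grid : List (List Int)) (out : List (List Int)) : Prop := out = solve_alt input_grid
instance (input_grid : List (List Int)) (out : List (List Int)) : Decidable (Spec_solve input_grid out) := by unfold Spec_solve; infer_instance

-- ===== CLAIM (what is proved, stated in full; the proofs are below) =====
def Claim_equal_solve : Prop := ∀ (input_grid : List (List Int)), Dom_solve input_grid → Pre_solve input_grid → Spec_solve input_grid (solve input_grid)

-- ===== LEMMAS AND PROOFS =====

-- both programs compute, at cell (i, j), 0 for a non-5 cell and 1 + (number of 5-cells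
-- strictly before (i, j) in reading order) for a 5-cell; the lemmas below characterise
-- each port by that common reference grid.

-- the input cell at Nat coordinates (out-of-range reads default, as both ports do)
def cellN (g : List (List Int)) (i j : Nat) : Int := (g.getD i []).getD j 0
-- number of 5-cells among columns [0, t) of row i
def cntRow (g : List (List Int)) (i t : Nat) : Nat :=
  (List.range t).countP (fun j => cellN g i j == 5)
-- number of 5-cells in rows [0, r) (full rows of width w)
def rowsCnt (g : List (List Int)) (w r : Nat) : Nat :=
  ((List.range r).map (fun i => cntRow g i w)).sum
-- the value both programs put at (i, j)
def valF (g : List (List Int)) (w i j : Nat) : Int :=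
  if cellN g i j = 5 then ((rowsCnt g w i + cntRow g i j : Nat) : Int) + 1 else 0
def numRow (g : List (List Int)) (w i : Nat) : List Int :=
  (List.range w).map (fun j => valF g w i j)
-- the width A and B read: len(input_grid[0])
def gw (g : List (List Int)) : Nat := ((PySem.List.pyGet? g 0).getD []).length
-- the reference grid
def refGrid (g : List (List Int)) : List (List Int) :=
  (List.range g.length).map (fun i => numRow g (gw g) i)

theorem cntRow_succ (g : List (List Int)) (i n : Nat) :
    cntRow g i (n + 1) = cntRow g i n + (if cellN g i n = 5 then 1 else 0) := by
  simp only [cntRow, List.range_succ, List.countP_append, List.countP_cons,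
    List.countP_nil]
  by_cases h : cellN g i n = 5 <;> simp [h]

theorem rowsCnt_succ (g : List (List Int)) (w r : Nat) :
    rowsCnt g w (r + 1) = rowsCnt g w r + cntRow g r w := by
  simp [rowsCnt, List.range_succ]

-- ---------- A-side ----------

-- the inner loop restricted to the row it writes
def rowStep (g : List (List Int)) (i : Int) (rc : List Int × Int) (j : Int) : List Int × Int :=
  if PySem.List.pyGetD (PySem.List.pyGetD g i []) j 0 == 5 then
    (rc.1.set j.toNat rc.2, rc.2 + 1)
  else rc

-- the inner loop only rewrites row i of the grid
theorem foldl_stepA (g : List (List Int)) (i : Int) (hi : 0 ≤ i) :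
    ∀ (js : List Int) (out : List (List Int)) (c : Int), i.toNat < out.length →
      js.foldl (stepA g i) (out, c) =
        (out.set i.toNat (js.foldl (rowStep g i) (out.getD i.toNat [], c)).1,
         (js.foldl (rowStep g i) (out.getD i.toNat [], c)).2) := by
  intro js
  induction js with
  | nil =>
    intro out c hlen
    simp only [List.foldl_nil]
    rw [List.getD_eq_getElem _ _ hlen, List.set_getElem_self]
  | cons j js ih =>
    intro out c hlen
    simp only [List.foldl_cons]
    by_cases hc : (PySem.List.pyGetD (PySem.List.pyGetD g i []) j 0 == 5) = true
    · rw [show stepA g i (out, c) j =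
            (out.set i.toNat ((PySem.List.pyGetD out i []).set j.toNat c), c + 1) from by
          simp [stepA, hc],
        show rowStep g i (out.getD i.toNat [], c) j =
            ((out.getD i.toNat []).set j.toNat c, c + 1) from by
          simp [rowStep, hc]]
      rw [PySem.List.pyGetD_of_nonneg _ _ hi]
      rw [ih _ _ (by simpa using hlen)]
      have hg : (out.set i.toNat ((out.getD i.toNat []).set j.toNat c)).getD i.toNat []
          = (out.getD i.toNat []).set j.toNat c := by
        rw [List.getD_eq_getElem _ _ (by simpa using hlen)]
        exact List.getElem_set_self (by simpa using hlen)
      rw [hg, List.set_set]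
    · rw [show stepA g i (out, c) j = (out, c) from by simp [stepA, hc],
        show rowStep g i (out.getD i.toNat [], c) j = (out.getD i.toNat [], c) from by
          simp [rowStep, hc]]
      exact ih out c hlen

-- the row loop over a zero row, started at counter c
theorem foldl_rowStep (g : List (List Int)) (w i : Nat) :
    ∀ (n : Nat), n ≤ w → ∀ (c : Int),
      (PySem.List.pyRange 0 (n : Int) 1).foldl (rowStep g (i : Int)) (List.replicate w 0, c) =
        ((List.range w).map
          (fun j => if j < n ∧ cellN g i j = 5 then c + (cntRow g i j : Int) else 0),
         c + (cntRow g i n : Int)) := by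
  intro n
  induction n with
  | zero =>
    intro _ c
    rw [show ((0 : Nat) : Int) = 0 from rfl, PySem.List.pyRange_one_eq_nil le_rfl]
    simp [cntRow, List.map_const']
  | succ n ih =>
    intro hn c
    rw [show ((n + 1 : Nat) : Int) = (n : Int) + 1 by push_cast; ring,
      PySem.List.pyRange_one_succ_right (by positivity), List.foldl_append,
      ih (by omega) c]
    simp only [List.foldl_cons, List.foldl_nil]
    by_cases hc : cellN g i n = 5
    · rw [show rowStep g (i : Int)
            ((List.range w).map
              (fun j => if j < n ∧ cellN g i j = 5 then c + (cntRow g i j : Int) else 0),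
             c + (cntRow g i n : Int)) (n : Int) =
          (((List.range w).map
              (fun j => if j < n ∧ cellN g i j = 5 then c + (cntRow g i j : Int) else 0)).set n
            (c + (cntRow g i n : Int)), c + (cntRow g i n : Int) + 1) from by
        simp only [rowStep, PySem.List.pyGetD_natCast]
        rw [show ((g.getD i []).getD n 0 == 5) = (cellN g i n == 5) from rfl]
        simp [hc]]
      refine Prod.ext ?_ ?_
      · refine List.ext_getElem (by simp) ?_
        intro k hk1 hk2
        simp only [List.getElem_set, List.getElem_map, List.getElem_range] at *
        rcases eq_or_ne n k with rfl | hne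
        · rw [if_pos rfl, if_pos ⟨by omega, hc⟩]
        · rw [if_neg hne]
          have : k < n + 1 ↔ k < n := by omega
          simp [this]
      · simp only [cntRow_succ, hc, if_pos]
        push_cast
        ring
    · rw [show rowStep g (i : Int)
            ((List.range w).map
              (fun j => if j < n ∧ cellN g i j = 5 then c + (cntRow g i j : Int) else 0),
             c + (cntRow g i n : Int)) (n : Int) =
          ((List.range w).map
              (fun j => if j < n ∧ cellN g i j = 5 then c + (cntRow g i j : Int) else 0),
           c + (cntRow g i n : Int)) from by
        simp only [rowStep, PySem.List.pyGetD_natCast]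
        rw [show ((g.getD i []).getD n 0 == 5) = (cellN g i n == 5) from rfl]
        simp [hc]]
      refine Prod.ext ?_ ?_
      · refine List.map_congr_left ?_
        intro k hk
        rcases eq_or_ne n k with rfl | hne
        · simp [hc]
        · have : k < n + 1 ↔ k < n := by omega
          simp [this]
      · simp [cntRow_succ, hc]

-- the outer loop after r rows
theorem foldl_outer (g : List (List Int)) :
    ∀ (r : Nat), r ≤ g.length →
      (PySem.List.pyRange 0 (r : Int) 1).foldl
        (fun st i => (PySem.List.pyRange 0 ((gw g : Nat) : Int) 1).foldl (stepA g i) st)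
        (List.replicate g.length (List.replicate (gw g) 0), (1 : Int)) =
      ((List.range g.length).map
        (fun i => if i < r then numRow g (gw g) i else List.replicate (gw g) 0),
       1 + (rowsCnt g (gw g) r : Int)) := by
  intro r
  induction r with
  | zero =>
    intro _
    rw [show ((0 : Nat) : Int) = 0 from rfl, PySem.List.pyRange_one_eq_nil le_rfl]
    simp [rowsCnt, List.map_const']
  | succ r ih =>
    intro hr
    have hrh : r < g.length := by omega
    rw [show ((r + 1 : Nat) : Int) = (r : Int) + 1 by push_cast; ring,
      PySem.List.pyRange_one_succ_right (by positivity), List.foldl_append, ih (by omega)]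
    simp only [List.foldl_cons, List.foldl_nil]
    rw [foldl_stepA g (r : Int) (by positivity) _ _ _ (by simp [hrh])]
    simp only [Int.toNat_natCast]
    rw [show ((List.range g.length).map
        (fun i => if i < r then numRow g (gw g) i else List.replicate (gw g) 0)).getD r []
        = List.replicate (gw g) 0 from by
      rw [List.getD_eq_getElem _ _ (by simpa using hrh)]
      simp]
    rw [foldl_rowStep g (gw g) r (gw g) le_rfl _]
    refine Prod.ext ?_ ?_
    · refine List.ext_getElem (by simp) ?_
      intro k hk1 hk2
      simp only [List.getElem_set, List.getElem_map, List.getElem_range]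
      rcases eq_or_ne r k with rfl | hne
      · rw [if_pos rfl, if_pos (Nat.lt_succ_self r)]
        unfold numRow valF
        refine List.map_congr_left ?_
        intro j hj
        have hj' : j < gw g := List.mem_range.mp hj
        by_cases hcell : cellN g r j = 5
        · simp only [hj', hcell, and_self, if_pos]
          push_cast
          ring
        · simp [hj', hcell]
      · rw [if_neg hne]
        have : k < r + 1 ↔ k < r := by omega
        simp [this]
    · simp only [rowsCnt_succ]
      push_cast
      ring

theorem solve_eq_refGrid (g : List (List Int)) : solve g = refGrid g := by
  have h1 : solve g = ((PySem.List.pyRange 0 (g.length : Int)).foldl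
      (fun st i => (PySem.List.pyRange 0 ((gw g : Nat) : Int)).foldl (stepA g i) st)
      ((PySem.List.pyRange 0 (g.length : Int)).map
        (fun _ => (PySem.List.pyRange 0 ((gw g : Nat) : Int)).map (fun _ => (0 : Int))),
       (1 : Int))).1 := rfl
  rw [h1, show (PySem.List.pyRange 0 (g.length : Int)).map
        (fun _ => (PySem.List.pyRange 0 ((gw g : Nat) : Int)).map (fun _ => (0 : Int)))
      = List.replicate g.length (List.replicate (gw g) 0) from by
    simp [List.map_const', PySem.List.length_pyRange_one]]
  rw [foldl_outer g g.length le_rfl]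
  unfold refGrid
  refine List.map_congr_left ?_
  intro i hi
  rw [if_pos (List.mem_range.mp hi)]

-- ---------- B-side ----------

-- row i's labels, with the count of earlier 5s threaded in as base c
def labRow (g : List (List Int)) (i n : Nat) (c : Int) : List Int :=
  (List.range n).map (fun j => if cellN g i j = 5 then c + (cntRow g i j : Int) + 1 else 0)

-- the 1-D pass over one row's cells appends that row's labels and advances the count
theorem foldl_stepB_row (g : List (List Int)) (i : Nat) :
    ∀ (n : Nat) (acc : List Int) (c : Int),
      ((List.range n).map (fun j => cellN g i j)).foldl stepB (acc, c) =
        (acc ++ labRow g i n c, c + (cntRow g i n : Int)) := by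
  intro n
  induction n with
  | zero => intro acc c; simp [labRow, cntRow]
  | succ n ih =>
    intro acc c
    rw [List.range_succ, List.map_append, List.foldl_append, ih]
    simp only [List.map_cons, List.map_nil, List.foldl_cons, List.foldl_nil, labRow,
      List.range_succ, List.map_append]
    by_cases hc : cellN g i n = 5
    · rw [show stepB (acc ++ (List.range n).map
            (fun j => if cellN g i j = 5 then c + (cntRow g i j : Int) + 1 else 0),
            c + (cntRow g i n : Int)) (cellN g i n) =
          ((acc ++ (List.range n).map
            (fun j => if cellN g i j = 5 then c + (cntRow g i j : Int) + 1 else 0)) ++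
            [c + (cntRow g i n : Int) + 1], c + (cntRow g i n : Int) + 1) from by
        simp [stepB, hc]]
      refine Prod.ext ?_ ?_
      · simp [hc, List.append_assoc]
      · simp only [cntRow_succ, hc, if_pos]
        push_cast
        ring
    · rw [show stepB (acc ++ (List.range n).map
            (fun j => if cellN g i j = 5 then c + (cntRow g i j : Int) + 1 else 0),
            c + (cntRow g i n : Int)) (cellN g i n) =
          ((acc ++ (List.range n).map
            (fun j => if cellN g i j = 5 then c + (cntRow g i j : Int) + 1 else 0)) ++
            [(0 : Int)], c + (cntRow g i n : Int)) from by
        simp [stepB, hc]]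
      refine Prod.ext ?_ ?_
      · simp [hc, List.append_assoc]
      · simp [cntRow_succ, hc]
  
-- the label row with the correct base is exactly the reference row
theorem labRow_eq_numRow (g : List (List Int)) (w i : Nat) :
    labRow g i w ((rowsCnt g w i : Nat) : Int) = numRow g w i := by
  unfold labRow numRow valF
  refine List.map_congr_left ?_
  intro j _
  by_cases hc : cellN g i j = 5
  · simp only [hc, if_pos]
    push_cast
    ring
  · simp [hc]

-- the 1-D pass over the first r flattened rows produces the first r reference rows, flattened
theorem foldl_stepB_rows (g : List (List Int)) (w : Nat) :
    ∀ (r : Nat),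
      ((((List.range r).map (fun i => (List.range w).map (fun j => cellN g i j))).flatten).foldl
          stepB (([] : List Int), (0 : Int))) =
        (((List.range r).map (fun i => numRow g w i)).flatten, (rowsCnt g w r : Int)) := by
  intro r
  induction r with
  | zero => simp [rowsCnt]
  | succ r ih =>
    rw [List.range_succ, List.map_append, List.flatten_append, List.foldl_append, ih]
    simp only [List.map_cons, List.map_nil, List.flatten_cons, List.flatten_nil,
      List.append_nil, List.map_append]
    rw [foldl_stepB_row g r w _ _, labRow_eq_numRow g w r]
    refine Prod.ext ?_ ?_
    · simp [List.flatten_append]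
    · simp only [rowsCnt_succ]
      push_cast
      ring

-- a map over a list is a map over its indices
theorem map_eq_map_range {α β : Type} (d : α) (f : α → β) (l : List α) :
    l.map f = (List.range l.length).map (fun i => f (l.getD i d)) := by
  refine List.ext_getElem (by simp) ?_
  intro k hk1 hk2
  simp only [List.getElem_map, List.getElem_range]
  rw [List.getD_eq_getElem _ _ (by simpa using hk2)]

-- B's flat list is the flattened list of (defaulted) rows read through cellN
theorem flat_eq (g : List (List Int)) :
    g.flatMap (fun row =>
      (PySem.List.pyRange 0 ((gw g : Nat) : Int) 1).map (fun j => PySem.List.pyGetD row j 0)) =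
    ((List.range g.length).map (fun i => (List.range (gw g)).map (fun j => cellN g i j))).flatten := by
  rw [List.flatMap_def, map_eq_map_range ([] : List Int)]
  refine congrArg List.flatten ?_
  refine List.map_congr_left ?_
  intro i _
  rw [PySem.List.pyRange_zero_nat (gw g), List.map_map]
  refine List.map_congr_left ?_
  intro j _
  simp [Function.comp, PySem.List.pyGetD_natCast, cellN]

-- taking chunk i of width w out of a flattened list of width-w rows gives row i
theorem flatten_chunk {α : Type} (w : Nat) :
    ∀ (l : List (List α)), (∀ x ∈ l, x.length = w) → ∀ (i : Nat), i < l.length →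
      ((l.flatten.drop (i * w)).take w) = l.getD i [] := by
  intro l
  induction l with
  | nil => intro _ i hi; simp at hi
  | cons x xs ih =>
    intro hlen i hi
    cases i with
    | zero =>
      simp only [Nat.zero_mul, List.drop_zero, List.flatten_cons, List.getD_cons_zero]
      rw [List.take_append_of_le_length (by rw [hlen x List.mem_cons_self]), List.take_of_length_le (by rw [hlen x List.mem_cons_self])]
    | succ i =>
      have hx : x.length = w := hlen x List.mem_cons_self
      have h2 : (i + 1) * w = x.length + i * w := by rw [hx]; ring
      rw [List.flatten_cons, h2, List.drop_append, List.drop_eq_nil_of_le (by omega),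
        List.nil_append, Nat.add_sub_cancel_left, List.getD_cons_succ]
      exact ih (fun y hy => hlen y (List.mem_cons_of_mem x hy)) i (by simpa using hi)

theorem solve_alt_eq_refGrid (g : List (List Int)) : solve_alt g = refGrid g := by
  have h1 : solve_alt g = (PySem.List.pyRange 0 (g.length : Int)).map
      (fun i => PySem.List.slice
        (((g.flatMap (fun row =>
            (PySem.List.pyRange 0 ((gw g : Nat) : Int) 1).map
              (fun j => PySem.List.pyGetD row j 0))).foldl stepB
          (([] : List Int), (0 : Int))).1)
        (some (i * ((gw g : Nat) : Int))) (some ((i + 1) * ((gw g : Nat) : Int)))) := rfl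
  rw [h1, flat_eq, foldl_stepB_rows g (gw g) g.length]
  rw [PySem.List.pyRange_zero_nat g.length, List.map_map]
  unfold refGrid
  refine List.map_congr_left ?_
  intro i hi
  have hi' : i < g.length := List.mem_range.mp hi
  simp only [Function.comp]
  rw [show ((i : Int) * ((gw g : Nat) : Int)) = ((i * gw g : Nat) : Int) by push_cast; ring,
    show (((i : Int) + 1) * ((gw g : Nat) : Int)) = ((i * gw g : Nat) : Int) + ((gw g : Nat) : Int) by push_cast; ring,
    PySem.List.slice_natCast_add]
  rw [flatten_chunk (gw g) ((List.range g.length).map (fun i => numRow g (gw g) i))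
    (by intro x hx; obtain ⟨k, _, rfl⟩ := List.mem_map.mp hx; simp [numRow])
    i (by simpa using hi')]
  rw [List.getD_eq_getElem _ _ (by simpa using hi')]
  simp

-- ===== VERDICT (by name: the statement is the Claim_ definition above) =====
theorem solve_spec : Claim_equal_solve := by
  intro g _ _
  unfold Spec_solve
  rw [solve_eq_refGrid, solve_alt_eq_refGrid]
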